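-- pv_equiv track=rewrite | github.com/jeongjinmyung/coding_test | 프로그래머스/unrated/132267. 콜라 문제/콜라 문제.py | solution
-- ===== SOURCE A (Python) =====
-- def solution(a,b,n):
--
--     ans = 0
--     remained = 0
--     cola = 0
--
--     while n >= a:
--         cola = n //a * b
--         remained = n % a
--         n = cola + remained
--         ans += cola
--
--     return ans
-- ===== SOURCE B (Python) =====
-- def solution(a, b, n):
--     # closed form: every exchange turns a bottles into b bottles, so the
--     # total received is (n - b) // (a - b) * b once any exchange is possible
--     if n < a:
--         return 0
--     return (n - b) // (a - b) * b
-- ===== Notes on version B (the rewrite author's own statement) =====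
-- stated objective: simpler
-- what changed: replaces the exchange-simulation loop by the closed-form formula (n-b)//(a-b)*b
-- outside the precondition, e.g. on solution(2, -1, 4): A returns -2, B returns -1
import Mathlib
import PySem

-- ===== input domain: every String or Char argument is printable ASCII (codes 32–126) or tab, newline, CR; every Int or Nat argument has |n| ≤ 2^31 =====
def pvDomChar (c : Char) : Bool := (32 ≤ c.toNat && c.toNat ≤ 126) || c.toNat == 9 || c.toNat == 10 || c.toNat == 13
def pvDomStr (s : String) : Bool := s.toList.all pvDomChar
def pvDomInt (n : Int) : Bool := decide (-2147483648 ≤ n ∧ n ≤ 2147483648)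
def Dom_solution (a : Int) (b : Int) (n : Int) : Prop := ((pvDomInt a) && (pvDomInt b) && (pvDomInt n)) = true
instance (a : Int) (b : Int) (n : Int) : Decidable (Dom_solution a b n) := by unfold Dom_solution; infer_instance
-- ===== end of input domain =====

-- B replaces A's exchange-simulation loop by the closed-form count (n-b)//(a-b)*b (simpler: no loop).

-- ===== PORT A =====
-- A's while loop, step for step; the fuel n.toNat+1 only bounds the recursion
-- (inside Pre_ the loop variable n strictly decreases and stays ≥ 0, so fuel never runs out).
def solutionLoopA (fuel : Nat) (a b : Int) : Int → Int → Int :=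
  match fuel with
  | 0 => fun _ ans => ans
  | fuel + 1 => fun n ans =>
    if a ≤ n then
      let cola := PySem.Int.floordiv n a * b
      let remained := PySem.Int.mod n a
      solutionLoopA fuel a b (cola + remained) (ans + cola)
    else ans

def solution (a : Int) (b : Int) (n : Int) : Int :=
  solutionLoopA (n.toNat + 1) a b n 0

-- ===== PORT B =====
def solution_alt (a : Int) (b : Int) (n : Int) : Int :=
  if a ≤ n then PySem.Int.floordiv (n - b) (a - b) * b else 0

-- ===== PRECONDITION & SPEC =====
-- Pre_ restricts the case n ≥ a to the task's natural domain 1 ≤ a, 0 ≤ b < a: for n ≥ a,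
-- a = 0 makes A raise ZeroDivisionError, a ≤ b makes the loop run forever, and a < 0 or b < 0
-- (negative bottle counts) lie outside the cola problem's natural domain, so B does not mimic
-- A's accidental values there; when n < a no exchange happens and all a, b are admitted.
def Pre_solution (a : Int) (b : Int) (n : Int) : Prop :=
  n < a ∨ (1 ≤ a ∧ 0 ≤ b ∧ b < a)
instance (a : Int) (b : Int) (n : Int) : Decidable (Pre_solution a b n) := by
  unfold Pre_solution; infer_instance

def pvWitness_solution : Int × Int × Int := (3, 1, 20)

def Spec_solution (a : Int) (b : Int) (n : Int) (out : Int) : Prop := out = solution_alt a b n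
instance (a : Int) (b : Int) (n : Int) (out : Int) : Decidable (Spec_solution a b n out) := by
  unfold Spec_solution; infer_instance

-- ===== CLAIM (what is proved, stated in full; the proofs are below) =====
def Claim_equal_solution : Prop := ∀ (a : Int) (b : Int) (n : Int), Dom_solution a b n → Pre_solution a b n → Spec_solution a b n (solution a b n)

-- ===== LEMMAS AND PROOFS =====

-- the closed-form value B computes, as a function of the loop variable n
def closedF (a b n : Int) : Int :=
  if a ≤ n then PySem.Int.floordiv (n - b) (a - b) * b else 0

lemma loopA_eq_closed (a b : Int) (ha : 1 ≤ a) (hb : 0 ≤ b) (hba : b < a) :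
    ∀ (fuel : Nat) (n ans : Int), (n < a ∨ n.toNat < fuel) →
      solutionLoopA fuel a b n ans = ans + closedF a b n := by
  intro fuel
  induction fuel with
  | zero =>
    intro n ans h
    have hn : n < a := by omega
    simp [solutionLoopA, closedF, not_le.mpr hn]
  | succ f ih =>
    intro n ans h
    by_cases hn : a ≤ n
    · have hfuel : n.toNat < f + 1 := by omega
      have h0n : 0 ≤ n := le_trans (by omega) hn
      have ha0 : 0 < a := by omega
      have hab : 0 < a - b := by omega
      -- q, r facts
      set q := PySem.Int.floordiv n a with hq
      set r := PySem.Int.mod n a with hr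
      have hqe : q = n / a := PySem.Int.floordiv_eq_ediv_of_pos ha0
      have hre : r = n % a := PySem.Int.mod_eq_emod_of_pos ha0
      have hr0 : 0 ≤ r := by rw [hre]; exact Int.emod_nonneg n (by omega)
      have hra : r < a := by rw [hre]; exact Int.emod_lt_of_pos n ha0
      have hnqr : n = q * a + r := by
        rw [hqe, hre]; have := Int.mul_ediv_add_emod n a; linarith
      have hq1 : 1 ≤ q := by
        rw [hqe]
        exact (Int.le_ediv_iff_mul_le ha0).mpr (by linarith)
      -- the new loop variable
      set n' := q * b + r with hn'
      have hn'0 : 0 ≤ n' := by positivity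
      have hdec : n' + (a - b) ≤ n := by
        have : (1 : Int) * (a - b) ≤ q * (a - b) :=
          mul_le_mul_of_nonneg_right hq1 (by omega)
        have hsub : n - n' = q * (a - b) := by rw [hnqr, hn']; ring
        omega
      have hlt : n' < n := by omega
      -- the division identity: (n-b)//(a-b) = q + (n'-b)//(a-b)
      have hsplit : (n - b) / (a - b) = (n' - b) / (a - b) + q := by
        have : n - b = (n' - b) + (a - b) * q := by rw [hnqr, hn']; ring
        rw [this, Int.add_mul_ediv_left _ _ (by omega : a - b ≠ 0)]
      have step : solutionLoopA (f + 1) a b n ans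
          = solutionLoopA f a b n' (ans + q * b) := by
        simp only [solutionLoopA, if_pos hn]
        rfl
      rw [step, ih n' (ans + q * b) (by omega)]
      -- now compare the closed forms
      unfold closedF
      rw [if_pos hn]
      by_cases hn'a : a ≤ n'
      · rw [if_pos hn'a,
          PySem.Int.floordiv_eq_ediv_of_pos hab, PySem.Int.floordiv_eq_ediv_of_pos hab,
          hsplit]
        ring
      · rw [if_neg hn'a, PySem.Int.floordiv_eq_ediv_of_pos hab, hsplit]
        have hnb0 : 0 ≤ n' - b := by
          have : 0 ≤ (q - 1) * b := mul_nonneg (by omega) hb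
          have : n' - b = (q - 1) * b + r := by rw [hn']; ring
          omega
        have hz : (n' - b) / (a - b) = 0 :=
          Int.ediv_eq_zero_of_lt hnb0 (by omega)
        rw [hz]; ring
    · simp [solutionLoopA, closedF, hn]

-- ===== VERDICT (by name: the statement is the Claim_ definition above) =====
theorem solution_spec : Claim_equal_solution := by
  intro a b n _ hpre
  unfold Spec_solution solution solution_alt
  rcases hpre with hlt | ⟨ha, hb, hba⟩
  · have hn : ¬ a ≤ n := not_le.mpr hlt
    simp [solutionLoopA, hn]
  · rw [loopA_eq_closed a b ha hb hba (n.toNat + 1) n 0 (by omega)]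
    unfold closedF
    simp
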